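-- pv_equiv track=rewrite | github.com/cmkwong/210204_computation_graph_plotting | graph.py | translate_paths_into_dict_list
-- ===== SOURCE A (Python) =====
-- def translate_paths_into_dict_list(raw_paths):
--     """
--     self.raw_paths = {  0: '> LogSoftmaxBackward > TBackward > MmBackward > ViewBackward > AccumulateGrad > R',
--                         1: '> LogSoftmaxBackward > TBackward > MmBackward > SigmoidBackward > AddBackward0 > MmBackward > ViewBackward > AccumulateGrad > K',
--                         ...}
--     :return: path_dict = {  'R': ['> LogSoftmaxBackward > TBackward > MmBackward > ViewBackward > AccumulateGrad > R', '> MmBackward > ViewBackward > AccumulateGrad > R', ... ],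
--                             'K': '> LogSoftmaxBackward > TBackward > MmBackward > SigmoidBackward > AddBackward0 > MmBackward > ViewBackward > AccumulateGrad > K', ' > MmBackward > ViewBackward > AccumulateGrad > K', ...],
--                             'H': ...
--                             ...}
--     """
--     path_dict = {}
--     for _, text_path in raw_paths.items():
--         key = text_path.split('>')[-1].strip()
--         if key in path_dict:
--             path_dict[key].append(text_path)
--         else:
--             path_dict[key] = []
--             path_dict[key].append(text_path)
--     return path_dict
-- ===== SOURCE B (Python) =====
-- def translate_paths_into_dict_list(raw_paths):
--     # precompute all keys, dedup them, then distribute the values into positional buckets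
--     vals = list(raw_paths.values())
--     ks = [v.split('>')[-1].strip() for v in vals]
--     keys = list(dict.fromkeys(ks))
--     pos = {k: i for i, k in enumerate(keys)}
--     buckets = [[] for _ in keys]
--     for k, v in zip(ks, vals):
--         buckets[pos[k]].append(v)
--     return dict(zip(keys, buckets))
-- ===== Notes on version B (the rewrite author's own statement) =====
-- stated objective: alternative
-- what changed: A grows a dict in one pass, testing key membership and inserting/appending as it goes; B precomputes the list of keys, deduplicates it once (dict.fromkeys), builds an index table, distributes the values into positional buckets, and zips keys with buckets at the end.
import Mathlib
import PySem

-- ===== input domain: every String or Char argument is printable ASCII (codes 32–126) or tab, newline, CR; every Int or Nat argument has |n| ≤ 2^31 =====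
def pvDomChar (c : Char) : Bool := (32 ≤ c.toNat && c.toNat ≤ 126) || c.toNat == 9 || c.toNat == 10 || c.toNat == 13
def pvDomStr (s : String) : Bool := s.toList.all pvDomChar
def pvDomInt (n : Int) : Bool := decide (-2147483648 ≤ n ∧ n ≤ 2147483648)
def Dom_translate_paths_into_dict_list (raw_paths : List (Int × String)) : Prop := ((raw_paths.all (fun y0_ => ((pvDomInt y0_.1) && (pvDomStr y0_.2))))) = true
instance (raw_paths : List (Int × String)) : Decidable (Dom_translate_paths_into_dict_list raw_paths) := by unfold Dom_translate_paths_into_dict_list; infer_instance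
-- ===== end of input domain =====

-- B replaces A's single-pass dict insertion with precomputed deduplicated keys, an index table and positional buckets (alternative, same result).


-- ===== PORT A =====
-- key = text_path.split('>')[-1].strip()   (split('>') is never empty, so [-1] is always in range)
def translate_paths_into_dict_list (raw_paths : List (Int × String)) : List (String × List String) :=
  (raw_paths.foldl (fun path_dict p =>
      let text_path := p.2
      let key := PySem.Str.strip (PySem.List.pyGetD ((PySem.Str.split? text_path ">").getD []) (-1) "")
      if path_dict.contains key then
        path_dict.modify key [] (fun l => l ++ [text_path])
      else
        (path_dict.insert key []).modify key [] (fun l => l ++ [text_path]))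
    PySem.Dict.empty).items

-- ===== PORT B =====
def key_of (text_path : String) : String :=
  PySem.Str.strip (PySem.List.pyGetD ((PySem.Str.split? text_path ">").getD []) (-1) "")

-- pos[k] never misses in B (every k in ks is in keys), so the total getD with default 0 is exact
def translate_paths_into_dict_list_alt (raw_paths : List (Int × String)) : List (String × List String) :=
  let vals := raw_paths.map (·.2)
  let ks := vals.map key_of
  let keys := PySem.List.dedup ks
  let pos : PySem.Dict String Int :=
    PySem.Dict.ofList ((PySem.List.enumerate keys).map (fun p => (p.2, p.1)))
  let buckets := (ks.zip vals).foldl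
      (fun bs kv => PySem.List.pySetD bs (pos.getD kv.1 0)
        (PySem.List.pyGetD bs (pos.getD kv.1 0) [] ++ [kv.2]))
      (keys.map (fun _ => ([] : List String)))
  (PySem.Dict.ofList (keys.zip buckets)).items

-- ===== PRECONDITION & SPEC =====
def Spec_translate_paths_into_dict_list (raw_paths : List (Int × String)) (out : List (String × List String)) : Prop := out = translate_paths_into_dict_list_alt raw_paths
instance (raw_paths : List (Int × String)) (out : List (String × List String)) : Decidable (Spec_translate_paths_into_dict_list raw_paths out) := by unfold Spec_translate_paths_into_dict_list; infer_instance

-- ===== CLAIM (what is proved, stated in full; the proofs are below) =====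
def Claim_equal_translate_paths_into_dict_list : Prop := ∀ (raw_paths : List (Int × String)), Dom_translate_paths_into_dict_list raw_paths → Spec_translate_paths_into_dict_list raw_paths (translate_paths_into_dict_list raw_paths)

-- ===== LEMMAS AND PROOFS =====

-- A's branch (insert an empty list, then append) is one dict-modify step
theorem step_eq (d : PySem.Dict String (List String)) (p : Int × String) :
    (let text_path := p.2
     let key := key_of text_path
     if d.contains key then d.modify key [] (fun l => l ++ [text_path])
     else (d.insert key []).modify key [] (fun l => l ++ [text_path]))
    = d.modify (key_of p.2) [] (fun l => l ++ [p.2]) := by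
  by_cases h : d.contains (key_of p.2)
  · simp [h]
  · have hc : d.contains (key_of p.2) = false := by simpa using h
    simp only [h]
    simp [PySem.Dict.modify, PySem.Dict.getD_insert_self, PySem.Dict.insert_insert_self,
      PySem.Dict.getD_of_not_contains, hc]

theorem translate_eq_modify_loop (raw_paths : List (Int × String)) :
    translate_paths_into_dict_list raw_paths
    = ((raw_paths.map (fun p => (key_of p.2, p.2))).foldl
        (fun d q => d.modify q.1 [] (fun l => l ++ [q.2])) PySem.Dict.empty).items := by
  unfold translate_paths_into_dict_list
  rw [List.foldl_map]
  congr 1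
  apply PySem.List.foldl_congr_mem
  intro d p _
  exact step_eq d p

-- A in closed form: deduplicated keys, each paired with the filtered values
theorem a_eq_groups (raw_paths : List (Int × String)) :
    translate_paths_into_dict_list raw_paths
    = (PySem.List.dedup ((raw_paths.map (·.2)).map key_of)).map
        (fun k => (k, (raw_paths.map (·.2)).filter (fun v => key_of v == k))) := by
  rw [translate_eq_modify_loop]
  set l := raw_paths.map (fun p => (key_of p.2, p.2)) with hl
  set d := l.foldl (fun d q => d.modify q.1 [] (fun l => l ++ [q.2])) PySem.Dict.empty with hd
  have hnd : d.keys.Nodup := by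
    rw [hd]
    exact PySem.Dict.nodup_keys_foldl_modify_key l (fun q => q.1) []
      (fun d q => fun l => l ++ [q.2]) PySem.Dict.empty (by simp)
  have hkeys : d.keys = PySem.List.dedup (l.map (·.1)) := by
    rw [hd]
    rw [PySem.Dict.keys_foldl_modify_key l (fun q => q.1) []
      (fun d q => fun l => l ++ [q.2]) PySem.Dict.empty]
    simp [PySem.Set.update_nil_left]
  have hget : ∀ c, d.getD c [] = (raw_paths.map (·.2)).filter (fun v => key_of v == c) := by
    intro c
    rw [hd, PySem.Dict.getD_foldl_modify_append]
    simp [hl, List.filter_map, Function.comp_def]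
  rw [PySem.Dict.items_eq_map_keys d hnd [], hkeys]
  have : l.map (·.1) = (raw_paths.map (·.2)).map key_of := by
    simp [hl, List.map_map, Function.comp_def]
  rw [this]
  apply List.map_congr_left
  intro k _
  rw [hget k]

-- the index table of B: pos[keys[j]] = j
theorem pos_getD (keys : List String) (hnd : keys.Nodup) (j : Nat) (hj : j < keys.length) :
    (PySem.Dict.ofList ((PySem.List.enumerate keys).map (fun p => (p.2, p.1)))).getD keys[j] 0
    = (j : Int) := by
  set pairs := (PySem.List.enumerate keys).map (fun p => (p.2, p.1)) with hp
  have hfst : pairs.map (·.1) = keys := by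
    simp [hp, List.map_map, Function.comp_def]
  have hitems : (PySem.Dict.ofList pairs).items = pairs := by
    have := PySem.Dict.items_foldl_insert_fresh (l := pairs) (k := (·.1)) (v := (·.2))
      (d := PySem.Dict.empty) (by simp) (by rw [hfst]; exact hnd)
    simpa [PySem.Dict.ofList] using this
  have hkeysnd : (PySem.Dict.ofList pairs).keys.Nodup := by
    have : (PySem.Dict.ofList pairs).keys = pairs.map (·.1) := by
      simp [PySem.Dict.keys, hitems]
    rw [this, hfst]; exact hnd
  have hmem : (keys[j], (j : Int)) ∈ pairs := by
    have he : j < (PySem.List.enumerate keys 0).length := by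
      rwa [PySem.List.length_enumerate]
    have := PySem.List.getElem_enumerate keys 0 j he
    simp only [zero_add] at this
    have : ((j : Int), keys[j]) ∈ PySem.List.enumerate keys 0 := by
      rw [← this]; exact List.getElem_mem he
    simpa [hp] using List.mem_map_of_mem (f := fun p => (p.2, p.1)) this
  have hmem' : (keys[j], (j : Int)) ∈ (PySem.Dict.ofList pairs).items := by
    rw [hitems]; exact hmem
  exact PySem.Dict.getD_of_mem_items (PySem.Dict.ofList pairs) hmem' hkeysnd 0

-- the bucket-distribution loop of B, in closed form
theorem buckets_foldl (keys : List String) (hnd : keys.Nodup)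
    (L : List (String × String)) (hm : ∀ kv ∈ L, kv.1 ∈ keys) :
    ∀ (bs : List (List String)), bs.length = keys.length →
      (L.foldl (fun bs kv =>
          PySem.List.pySetD bs
            ((PySem.Dict.ofList ((PySem.List.enumerate keys).map (fun p => (p.2, p.1)))).getD kv.1 0)
            (PySem.List.pyGetD bs
              ((PySem.Dict.ofList ((PySem.List.enumerate keys).map (fun p => (p.2, p.1)))).getD kv.1 0) []
              ++ [kv.2])) bs).length = keys.length
      ∧ ∀ (i : Nat) (hi : i < keys.length),
        (L.foldl (fun bs kv =>
          PySem.List.pySetD bs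
            ((PySem.Dict.ofList ((PySem.List.enumerate keys).map (fun p => (p.2, p.1)))).getD kv.1 0)
            (PySem.List.pyGetD bs
              ((PySem.Dict.ofList ((PySem.List.enumerate keys).map (fun p => (p.2, p.1)))).getD kv.1 0) []
              ++ [kv.2])) bs)[i]?
        = some (bs.getD i [] ++ (L.filter (fun kv => kv.1 == keys[i])).map (·.2)) := by
  induction L with
  | nil =>
    intro bs hlen
    refine ⟨hlen, fun i hi => ?_⟩
    simp [List.getElem?_eq_getElem (by omega : i < bs.length)]
  | cons kv rest ih =>
    intro bs hlen
    -- the head step sets bucket j, the position of kv.1 in keys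
    have hk : kv.1 ∈ keys := hm kv (List.mem_cons_self)
    obtain ⟨j, hj, hkj⟩ : ∃ j, ∃ (hj : j < keys.length), keys[j] = kv.1 :=
      ⟨List.idxOf kv.1 keys, List.idxOf_lt_length_of_mem hk, List.getElem_idxOf _⟩
    have hpos : (PySem.Dict.ofList ((PySem.List.enumerate keys).map (fun p => (p.2, p.1)))).getD kv.1 0 = (j : Int) := by
      rw [← hkj]; exact pos_getD keys hnd j hj
    have hstep : (PySem.List.pySetD bs
        ((PySem.Dict.ofList ((PySem.List.enumerate keys).map (fun p => (p.2, p.1)))).getD kv.1 0)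
        (PySem.List.pyGetD bs
          ((PySem.Dict.ofList ((PySem.List.enumerate keys).map (fun p => (p.2, p.1)))).getD kv.1 0) []
          ++ [kv.2]))
        = bs.set j (bs.getD j [] ++ [kv.2]) := by
      rw [hpos, PySem.List.pySetD_natCast, PySem.List.pyGetD_natCast]
    have hlen' : (bs.set j (bs.getD j [] ++ [kv.2])).length = keys.length := by
      simpa using hlen
    obtain ⟨ihlen, ihget⟩ := ih (fun q hq => hm q (List.mem_cons_of_mem _ hq))
      (bs.set j (bs.getD j [] ++ [kv.2])) hlen'
    rw [List.foldl_cons, hstep]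
    refine ⟨ihlen, fun i hi => ?_⟩
    rw [ihget i hi]
    by_cases hij : i = j
    · have hki : keys[i] = kv.1 := by subst hij; exact hkj
      have hfil : ((kv.1 == keys[i]) = true) := by rw [hki]; simp
      simp only [List.filter_cons, hfil, if_true, List.map_cons]
      have h1 : (bs.set j (bs.getD j [] ++ [kv.2])).getD i [] = bs.getD i [] ++ [kv.2] := by
        subst hij
        rw [List.getD_eq_getElem?_getD, List.getElem?_set_self (by omega)]
        simp
      rw [h1]
      simp
    · have hfil : ((kv.1 == keys[i]) = false) := by
        simp only [beq_eq_false_iff_ne, ne_eq]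
        intro h
        apply hij
        exact (hnd.getElem_inj_iff.mp (by rw [hkj, h])).symm
      simp only [List.filter_cons, hfil, Bool.false_eq_true, if_false]
      have h1 : (bs.set j (bs.getD j [] ++ [kv.2])).getD i [] = bs.getD i [] := by
        rw [List.getD_eq_getElem?_getD, List.getElem?_set_ne (fun h => hij h.symm),
          ← List.getD_eq_getElem?_getD]
      rw [h1]

-- B in the same closed form as A
theorem b_eq_groups (raw_paths : List (Int × String)) :
    translate_paths_into_dict_list_alt raw_paths
    = (PySem.List.dedup ((raw_paths.map (·.2)).map key_of)).map
        (fun k => (k, (raw_paths.map (·.2)).filter (fun v => key_of v == k))) := by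
  unfold translate_paths_into_dict_list_alt
  simp only []
  set vals := raw_paths.map (·.2) with hvals
  set ks := vals.map key_of with hks
  set keys := PySem.List.dedup ks with hkeys
  have hnd : keys.Nodup := by rw [hkeys]; exact PySem.List.nodup_dedup ks
  have hzip : ks.zip vals = vals.map (fun v => (key_of v, v)) := by
    rw [hks]
    apply List.ext_getElem (by simp)
    intro i h1 h2
    simp [List.getElem_zip]
  have hmem : ∀ kv ∈ ks.zip vals, kv.1 ∈ keys := by
    intro kv hkv
    rw [hzip] at hkv
    obtain ⟨v, hv, rfl⟩ := List.mem_map.mp hkv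
    rw [hkeys]
    exact (PySem.List.mem_dedup _ _).mpr (by rw [hks]; exact List.mem_map_of_mem hv)
  obtain ⟨hlen, hget⟩ := buckets_foldl keys hnd (ks.zip vals) hmem
    (keys.map (fun _ => ([] : List String))) (by simp)
  set buckets := (ks.zip vals).foldl _ (keys.map (fun _ => ([] : List String))) with hb
  have hbval : ∀ (i : Nat) (hi : i < keys.length),
      buckets[i]? = some (vals.filter (fun v => key_of v == keys[i])) := by
    intro i hi
    rw [hb, hget i hi]
    congr 1
    rw [List.getD_eq_getElem _ _ (by simpa using hi)]
    simp only [List.getElem_map]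
    rw [hzip, List.filter_map, List.map_map]
    simp [Function.comp_def]
  -- dict(zip(keys, buckets)) lists its pairs unchanged: the keys are distinct
  have hlenz : (keys.zip buckets).length = keys.length := by
    rw [List.length_zip, hlen]; omega
  have hfst : (keys.zip buckets).map (·.1) = keys := by
    apply List.ext_getElem (by simp [hlenz])
    intro i h1 h2
    simp [List.getElem_zip]
  have hitems : (PySem.Dict.ofList (keys.zip buckets)).items = keys.zip buckets := by
    have := PySem.Dict.items_foldl_insert_fresh (l := keys.zip buckets) (k := (·.1)) (v := (·.2))
      (d := PySem.Dict.empty) (by simp) (by rw [hfst]; exact hnd)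
    simpa [PySem.Dict.ofList] using this
  rw [hitems]
  apply List.ext_getElem (by simp [hlenz])
  intro i h1 h2
  have hi : i < keys.length := by simpa [hlenz] using h1
  have : buckets[i]'(by omega) = vals.filter (fun v => key_of v == keys[i]) := by
    have := hbval i hi
    rwa [List.getElem?_eq_getElem (by omega), Option.some_inj] at this
  simp [List.getElem_zip, this]

-- ===== VERDICT (by name: the statement is the Claim_ definition above) =====
theorem translate_paths_into_dict_list_spec : Claim_equal_translate_paths_into_dict_list := by
  intro raw_paths _
  unfold Spec_translate_paths_into_dict_list
  rw [a_eq_groups, b_eq_groups]
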